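-- pv_equiv track=rewrite | github.com/Bench-amblee/vscode | 2023 - Advent of Code/AdventOfCode_03.py | sum_of_adjacent_numbers
-- ===== SOURCE A (Python) =====
-- def is_valid_position(row, col, rows, cols):
--     return 0 <= row < rows and 0 <= col < cols
--
-- def get_adjacent_numbers(schematic, row, col):
--     rows, cols = len(schematic), len(schematic[0])
--     directions = [(0, 1), (0, -1), (1, 0), (-1, 0), (1, 1), (1, -1), (-1, 1), (-1, -1)]
--
--     adjacent_numbers = []
--     for dr, dc in directions:
--         new_row, new_col = row + dr, col + dc
--         if is_valid_position(new_row, new_col, rows, cols) and schematic[new_row][new_col].isdigit():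
--             adjacent_numbers.append(int(schematic[new_row][new_col]))
--
--     return adjacent_numbers
--
-- def sum_of_adjacent_numbers(schematic):
--     rows, cols = len(schematic), len(schematic[0])
--     total_sum = 0
--
--     for row in range(rows):
--         for col in range(cols):
--             if schematic[row][col].isdigit():
--                 adjacent_numbers = get_adjacent_numbers(schematic, row, col)
--                 total_sum += int(schematic[row][col]) + sum(adjacent_numbers)
--
--     return total_sum
-- ===== SOURCE B (Python) =====
-- def sum_of_adjacent_numbers(schematic):
--     rows, cols = len(schematic), len(schematic[0])
--
--     def digit_value(r, c):
--         ch = schematic[r][c]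
--         return int(ch) if ch.isdigit() else None
--
--     base = 0
--     for r in range(rows):
--         for c in range(cols):
--             v = digit_value(r, c)
--             if v is not None:
--                 base += v
--
--     edges = 0
--     for r in range(rows):
--         for c in range(cols):
--             v = digit_value(r, c)
--             if v is None:
--                 continue
--             for dr, dc in ((0, 1), (1, 0), (1, 1), (1, -1)):
--                 nr, nc = r + dr, c + dc
--                 if 0 <= nr < rows and 0 <= nc < cols:
--                     w = digit_value(nr, nc)
--                     if w is not None:
--                         edges += v + w
--
--     return base + edges
-- ===== Notes on version B (the rewrite author's own statement) =====
-- stated objective: alternative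
-- what changed: Replaces A's per-cell collection of all 8 neighbor values (helper building a list per digit cell) by a base pass summing digit cells plus an edge pass that visits each adjacency once via the 4 forward directions and adds both endpoint values.
import Mathlib
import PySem

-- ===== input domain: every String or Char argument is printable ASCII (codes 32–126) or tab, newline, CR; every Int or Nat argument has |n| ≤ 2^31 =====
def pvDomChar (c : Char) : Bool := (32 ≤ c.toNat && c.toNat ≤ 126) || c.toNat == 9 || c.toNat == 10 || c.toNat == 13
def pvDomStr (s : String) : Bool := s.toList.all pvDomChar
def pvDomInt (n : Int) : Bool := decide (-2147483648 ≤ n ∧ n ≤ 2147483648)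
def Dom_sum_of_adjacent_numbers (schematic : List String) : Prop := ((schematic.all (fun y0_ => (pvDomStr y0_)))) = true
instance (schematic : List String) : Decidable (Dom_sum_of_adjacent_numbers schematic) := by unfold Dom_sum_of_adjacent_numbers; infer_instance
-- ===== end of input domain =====

-- B replaces A's per-cell collection of all 8 neighbour values by a base pass over digit cells
-- plus an edge pass over the 4 forward directions that adds both endpoints of each adjacency once
-- (objective: alternative decomposition, same asymptotic cost).


-- ===== PORT A =====
-- shared transliterations of the Python expressions `schematic[r][c]`, `ch.isdigit()`, `int(ch)`
-- (these expressions occur verbatim in both sources).  `.getD` supplies a value exactly where the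
-- Python indexing would raise IndexError; Pre_ excludes those inputs.
def pvCharAt (g : List (List Char)) (r c : Int) : Char :=
  (PySem.List.pyGet? ((PySem.List.pyGet? g r).getD []) c).getD ' '

def pvIsDigit (c : Char) : Bool := PySem.Chars.isdigit c

def pvIntOf (c : Char) : Int := (PySem.Int.ofChars? [c]).getD 0

def pvIsValid (row col rows cols : Int) : Bool :=
  decide (0 ≤ row ∧ row < rows) && decide (0 ≤ col ∧ col < cols)

def pvDirs8 : List (Int × Int) :=
  [(0, 1), (0, -1), (1, 0), (-1, 0), (1, 1), (1, -1), (-1, 1), (-1, -1)]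

def pvGetAdjacent (g : List (List Char)) (row col : Int) : List Int :=
  let rows : Int := g.length
  let cols : Int := (g.headD []).length
  pvDirs8.foldl (fun acc d =>
    let nr := row + d.1
    let nc := col + d.2
    if pvIsValid nr nc rows cols && pvIsDigit (pvCharAt g nr nc) then
      acc ++ [pvIntOf (pvCharAt g nr nc)]
    else acc) []

def sum_of_adjacent_numbers (schematic : List String) : Int :=
  let g := schematic.map String.toList
  let rows : Int := g.length
  let cols : Int := (g.headD []).length
  (PySem.List.pyRange 0 rows 1).foldl (fun t row =>
    (PySem.List.pyRange 0 cols 1).foldl (fun t col =>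
      if pvIsDigit (pvCharAt g row col) then
        t + (pvIntOf (pvCharAt g row col) + (pvGetAdjacent g row col).sum)
      else t) t) 0

-- ===== PORT B =====
def pvDigitValue (g : List (List Char)) (r c : Int) : Option Int :=
  if pvIsDigit (pvCharAt g r c) then some (pvIntOf (pvCharAt g r c)) else none

def pvDirs4 : List (Int × Int) := [(0, 1), (1, 0), (1, 1), (1, -1)]

def sum_of_adjacent_numbers_alt (schematic : List String) : Int :=
  let g := schematic.map String.toList
  let rows : Int := g.length
  let cols : Int := (g.headD []).length
  let base := (PySem.List.pyRange 0 rows 1).foldl (fun t r =>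
    (PySem.List.pyRange 0 cols 1).foldl (fun t c =>
      match pvDigitValue g r c with
      | some v => t + v
      | none => t) t) 0
  let edges := (PySem.List.pyRange 0 rows 1).foldl (fun t r =>
    (PySem.List.pyRange 0 cols 1).foldl (fun t c =>
      match pvDigitValue g r c with
      | none => t
      | some v =>
        pvDirs4.foldl (fun t d =>
          let nr := r + d.1
          let nc := c + d.2
          if (0 ≤ nr ∧ nr < rows) ∧ (0 ≤ nc ∧ nc < cols) then
            match pvDigitValue g nr nc with
            | some w => t + (v + w)
            | none => t
          else t) t) t) 0
  base + edges

-- ===== PRECONDITION & SPEC =====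
-- Pre_ excludes exactly the inputs where the Python A raises IndexError: the empty grid
-- (schematic[0]) and ragged grids in which some row is shorter than the first row.
def Pre_sum_of_adjacent_numbers (schematic : List String) : Prop :=
  schematic ≠ [] ∧ ∀ s ∈ schematic, (schematic.headD "").length ≤ s.length

instance (schematic : List String) : Decidable (Pre_sum_of_adjacent_numbers schematic) := by
  unfold Pre_sum_of_adjacent_numbers; infer_instance

def pvWitness_sum_of_adjacent_numbers : List String := ["12", ".3"]

def Spec_sum_of_adjacent_numbers (schematic : List String) (out : Int) : Prop := out = sum_of_adjacent_numbers_alt schematic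
instance (schematic : List String) (out : Int) : Decidable (Spec_sum_of_adjacent_numbers schematic out) := by unfold Spec_sum_of_adjacent_numbers; infer_instance

-- ===== CLAIM (what is proved, stated in full; the proofs are below) =====
def Claim_equal_sum_of_adjacent_numbers : Prop := ∀ (schematic : List String), Dom_sum_of_adjacent_numbers schematic → Pre_sum_of_adjacent_numbers schematic → Spec_sum_of_adjacent_numbers schematic (sum_of_adjacent_numbers schematic)

-- ===== LEMMAS AND PROOFS =====

-- the in-bounds-and-digit test both programs make at a cell, as one predicate on ℤ × ℤ
def pvDig (g : List (List Char)) (p : Int × Int) : Bool :=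
  pvIsValid p.1 p.2 (g.length : Int) ((g.headD []).length : Int) && pvIsDigit (pvCharAt g p.1 p.2)

def pvV (g : List (List Char)) (p : Int × Int) : Int := pvIntOf (pvCharAt g p.1 p.2)

def pvRect (R C : Nat) : Finset (Int × Int) :=
  ((Finset.range R) ×ˢ (Finset.range C)).image (fun p => ((p.1 : Int), (p.2 : Int)))

def pvRectOf (g : List (List Char)) : Finset (Int × Int) := pvRect g.length (g.headD []).length

-- the two sum "atoms": over all cells p, neighbour value resp. own value of a realized adjacency p → p+d
def pvT (g : List (List Char)) (d : Int × Int) : Int :=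
  ∑ p ∈ pvRectOf g, if (pvDig g p && pvDig g (p.1 + d.1, p.2 + d.2)) = true then pvV g (p.1 + d.1, p.2 + d.2) else 0

def pvU (g : List (List Char)) (d : Int × Int) : Int :=
  ∑ p ∈ pvRectOf g, if (pvDig g p && pvDig g (p.1 + d.1, p.2 + d.2)) = true then pvV g p else 0

lemma pvRect_mem {R C : Nat} {p : Int × Int} :
    p ∈ pvRect R C ↔ 0 ≤ p.1 ∧ p.1 < (R : Int) ∧ 0 ≤ p.2 ∧ p.2 < (C : Int) := by
  cases p with | mk a b =>
  simp only [pvRect, Finset.mem_image, Finset.mem_product, Finset.mem_range, Prod.mk.injEq, Prod.exists]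
  constructor
  · rintro ⟨x, y, ⟨hx, hy⟩, h1, h2⟩; omega
  · rintro ⟨h0, h1, h2, h3⟩
    refine ⟨a.toNat, b.toNat, ⟨by omega, by omega⟩, by omega, by omega⟩

lemma pvDig_mem {g : List (List Char)} {p : Int × Int} (h : pvDig g p = true) : p ∈ pvRectOf g := by
  simp only [pvDig, pvIsValid, Bool.and_eq_true, decide_eq_true_eq] at h
  exact pvRect_mem.mpr (by tauto)

-- reindexing p ↦ (p.1 - a, p.2 - b): summing the backward neighbour's value equals summing the
-- cell's own value over forward adjacencies
lemma pvTU (g : List (List Char)) (a b : Int) : pvT g (-a, -b) = pvU g (a, b) := by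
  unfold pvT pvU
  rw [← Finset.sum_filter, ← Finset.sum_filter]
  apply Finset.sum_nbij' (i := fun p : Int × Int => (p.1 + -a, p.2 + -b))
    (j := fun p : Int × Int => (p.1 + a, p.2 + b))
  · intro p hp
    simp only [Finset.mem_filter, Bool.and_eq_true] at hp ⊢
    refine ⟨pvDig_mem hp.2.2, hp.2.2, ?_⟩
    have := hp.2.1
    simpa [add_assoc] using this
  · intro p hp
    simp only [Finset.mem_filter, Bool.and_eq_true] at hp ⊢
    refine ⟨pvDig_mem hp.2.2, hp.2.2, ?_⟩
    have := hp.2.1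
    simpa [add_assoc] using this
  · intro p _; simp [add_assoc]
  · intro p _; simp [add_assoc]
  · intro p _; rfl

-- fold over pyRange of an accumulate-only body is an initial value plus a Finset.range sum
lemma pvFoldRange (n : Nat) (f : Int → Int) (t0 : Int) :
    (PySem.List.pyRange 0 (n : Int) 1).foldl (fun t x => t + f x) t0
      = t0 + ∑ i ∈ Finset.range n, f (i : Int) := by
  rw [show PySem.List.pyRange 0 (n:Int) 1 = PySem.List.pyRange 0 (n:Int) from rfl,
     PySem.List.pyRange_zero_natCast, PySem.List.foldl_add]
  congr 1
  simp [List.map_map, Finset.range, Multiset.range, Function.comp_def]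

lemma pvSum2 (R C : Nat) (F : Int → Int → Int) :
    (∑ r ∈ Finset.range R, ∑ c ∈ Finset.range C, F (r : Int) (c : Int))
      = ∑ p ∈ pvRect R C, F p.1 p.2 := by
  rw [pvRect, Finset.sum_image (by intro x hx y hy h; simpa [Prod.ext_iff] using h)]
  rw [Finset.sum_product]

-- the doubly nested row/column loop of either program is a sum over the grid rectangle
lemma pvFold2 (R C : Nat) (F : Int → Int → Int) :
    (PySem.List.pyRange 0 (R : Int) 1).foldl (fun t r =>
      (PySem.List.pyRange 0 (C : Int) 1).foldl (fun t c => t + F r c) t) 0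
      = ∑ p ∈ pvRect R C, F p.1 p.2 := by
  simp only [pvFoldRange]
  rw [zero_add, pvSum2]

lemma pvSum_filter_map {α : Type} (p : α → Bool) (f : α → Int) (l : List α) :
    ((l.filter p).map f).sum = (l.map fun x => if p x then f x else 0).sum := by
  induction l with
  | nil => simp
  | cons x xs ih => by_cases h : p x <;> simp [h, ih]

-- get_adjacent_numbers's list, summed, as a map-sum over the direction list
lemma pvAdj_sum (g : List (List Char)) (r c : Int) :
    (pvGetAdjacent g r c).sum
      = (pvDirs8.map (fun d => if pvDig g (r + d.1, c + d.2) = true then pvV g (r + d.1, c + d.2) else 0)).sum := by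
  show (pvDirs8.foldl (fun acc d =>
      if (pvIsValid (r + d.1) (c + d.2) (g.length : Int) ((g.headD []).length : Int)
          && pvIsDigit (pvCharAt g (r + d.1) (c + d.2))) = true then
        acc ++ [pvIntOf (pvCharAt g (r + d.1) (c + d.2))]
      else acc) []).sum = _
  rw [PySem.List.foldl_append_if (p := fun d : Int × Int =>
        pvIsValid (r + d.1) (c + d.2) (g.length : Int) ((g.headD []).length : Int)
          && pvIsDigit (pvCharAt g (r + d.1) (c + d.2)))
      (f := fun d : Int × Int => pvIntOf (pvCharAt g (r + d.1) (c + d.2)))]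
  simp only [List.nil_append]
  rw [pvSum_filter_map]
  rfl

lemma pvIteAdd {b : Bool} {t x : Int} : (if b = true then t + x else t) = t + (if b = true then x else 0) := by
  split <;> simp

-- splitting "digit cell times list of guarded neighbour terms" into the atoms pvT / pvU
lemma pvSplitT (g : List (List Char)) (ds : List (Int × Int)) :
    (∑ p ∈ pvRectOf g, if pvDig g p = true then
        (ds.map (fun d => if pvDig g (p.1 + d.1, p.2 + d.2) = true then pvV g (p.1 + d.1, p.2 + d.2) else 0)).sum
      else 0)
      = (ds.map (fun d => pvT g d)).sum := by
  induction ds with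
  | nil => simp
  | cons d ds ih =>
    simp only [List.map_cons, List.sum_cons]
    have step : ∀ p ∈ pvRectOf g,
        (if pvDig g p = true then
            (if pvDig g (p.1 + d.1, p.2 + d.2) = true then pvV g (p.1 + d.1, p.2 + d.2) else 0)
              + (ds.map (fun d => if pvDig g (p.1 + d.1, p.2 + d.2) = true then pvV g (p.1 + d.1, p.2 + d.2) else 0)).sum
          else 0)
          = (if (pvDig g p && pvDig g (p.1 + d.1, p.2 + d.2)) = true then pvV g (p.1 + d.1, p.2 + d.2) else 0)
            + (if pvDig g p = true then
                (ds.map (fun d => if pvDig g (p.1 + d.1, p.2 + d.2) = true then pvV g (p.1 + d.1, p.2 + d.2) else 0)).sum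
              else 0) := by
      intro p _
      by_cases h : pvDig g p = true <;> simp [h]
    rw [Finset.sum_congr rfl step, Finset.sum_add_distrib, ih]
    rfl

lemma pvSplitUT (g : List (List Char)) (ds : List (Int × Int)) :
    (∑ p ∈ pvRectOf g, if pvDig g p = true then
        (ds.map (fun d => if pvDig g (p.1 + d.1, p.2 + d.2) = true then pvV g p + pvV g (p.1 + d.1, p.2 + d.2) else 0)).sum
      else 0)
      = (ds.map (fun d => pvU g d + pvT g d)).sum := by
  induction ds with
  | nil => simp
  | cons d ds ih =>
    simp only [List.map_cons, List.sum_cons]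
    have step : ∀ p ∈ pvRectOf g,
        (if pvDig g p = true then
            (if pvDig g (p.1 + d.1, p.2 + d.2) = true then pvV g p + pvV g (p.1 + d.1, p.2 + d.2) else 0)
              + (ds.map (fun d => if pvDig g (p.1 + d.1, p.2 + d.2) = true then pvV g p + pvV g (p.1 + d.1, p.2 + d.2) else 0)).sum
          else 0)
          = ((if (pvDig g p && pvDig g (p.1 + d.1, p.2 + d.2)) = true then pvV g p else 0)
              + (if (pvDig g p && pvDig g (p.1 + d.1, p.2 + d.2)) = true then pvV g (p.1 + d.1, p.2 + d.2) else 0))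
            + (if pvDig g p = true then
                (ds.map (fun d => if pvDig g (p.1 + d.1, p.2 + d.2) = true then pvV g p + pvV g (p.1 + d.1, p.2 + d.2) else 0)).sum
              else 0) := by
      intro p _
      by_cases h : pvDig g p = true
      · by_cases h' : pvDig g (p.1 + d.1, p.2 + d.2) = true <;> simp [h, h']
      · simp [h]
    rw [Finset.sum_congr rfl step, Finset.sum_add_distrib, ih, Finset.sum_add_distrib]
    rfl

-- inside the rectangle the bare digit test agrees with pvDig
lemma pvDig_of_mem {g : List (List Char)} {p : Int × Int} (hp : p ∈ pvRectOf g) :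
    pvIsDigit (pvCharAt g p.1 p.2) = pvDig g p := by
  have h := pvRect_mem.mp hp
  have h1 : pvIsValid p.1 p.2 (g.length : Int) ((g.headD []).length : Int) = true := by
    simp only [pvIsValid, Bool.and_eq_true, decide_eq_true_eq]
    tauto
  unfold pvDig
  rw [h1, Bool.true_and]

-- port A as a rectangle sum
lemma pvA_eq (s : List String) :
    sum_of_adjacent_numbers s
      = (∑ p ∈ pvRectOf (s.map String.toList), if pvDig (s.map String.toList) p = true then pvV (s.map String.toList) p else 0)
        + (pvDirs8.map (fun d => pvT (s.map String.toList) d)).sum := by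
  set g := s.map String.toList with hg
  show (PySem.List.pyRange 0 (g.length : Int) 1).foldl (fun t row =>
    (PySem.List.pyRange 0 ((g.headD []).length : Int) 1).foldl (fun t col =>
      if pvIsDigit (pvCharAt g row col) = true then
        t + (pvIntOf (pvCharAt g row col) + (pvGetAdjacent g row col).sum)
      else t) t) 0 = _
  simp only [pvIteAdd]
  rw [pvFold2 g.length (g.headD []).length
    (fun r c => if pvIsDigit (pvCharAt g r c) = true then pvIntOf (pvCharAt g r c) + (pvGetAdjacent g r c).sum else 0)]
  rw [show pvRect g.length (g.headD []).length = pvRectOf g from rfl]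
  have hcong : ∀ p ∈ pvRectOf g,
      (if pvIsDigit (pvCharAt g p.1 p.2) = true then pvIntOf (pvCharAt g p.1 p.2) + (pvGetAdjacent g p.1 p.2).sum else 0)
        = (if pvDig g p = true then pvV g p else 0)
          + (if pvDig g p = true then
              (pvDirs8.map (fun d => if pvDig g (p.1 + d.1, p.2 + d.2) = true then pvV g (p.1 + d.1, p.2 + d.2) else 0)).sum
            else 0) := by
    intro p hp
    rw [pvDig_of_mem hp, pvAdj_sum]
    by_cases h : pvDig g p = true <;> simp [pvV, h]
  rw [Finset.sum_congr rfl hcong, Finset.sum_add_distrib, pvSplitT]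

-- normalizing port B's inner match/if bodies
lemma pvBBase_cell (g : List (List Char)) (r c t : Int) :
    (match pvDigitValue g r c with
     | some v => t + v
     | none => t)
      = t + (if pvIsDigit (pvCharAt g r c) = true then pvV g (r, c) else 0) := by
  by_cases h : pvIsDigit (pvCharAt g r c) = true <;> simp [pvDigitValue, pvV, h]

lemma pvBEdge_dir (g : List (List Char)) (r c v t : Int) (d : Int × Int) :
    (if (0 ≤ r + d.1 ∧ r + d.1 < (g.length : Int)) ∧ (0 ≤ c + d.2 ∧ c + d.2 < ((g.headD []).length : Int)) then
       match pvDigitValue g (r + d.1) (c + d.2) with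
       | some w => t + (v + w)
       | none => t
     else t)
      = t + (if pvDig g (r + d.1, c + d.2) = true then v + pvV g (r + d.1, c + d.2) else 0) := by
  by_cases h1 : (0 ≤ r + d.1 ∧ r + d.1 < (g.length : Int)) ∧ (0 ≤ c + d.2 ∧ c + d.2 < ((g.headD []).length : Int))
  · have h1' : pvIsValid (r + d.1) (c + d.2) (g.length : Int) ((g.headD []).length : Int) = true := by
      simp only [pvIsValid, Bool.and_eq_true, decide_eq_true_eq]
      tauto
    have hd : pvDig g (r + d.1, c + d.2) = pvIsDigit (pvCharAt g (r + d.1) (c + d.2)) := by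
      unfold pvDig
      rw [h1']
      exact Bool.true_and _
    rw [if_pos h1, hd]
    by_cases h2 : pvIsDigit (pvCharAt g (r + d.1) (c + d.2)) = true <;>
      simp [pvDigitValue, pvV, h2]
  · rw [if_neg h1]
    have hd : ¬ pvDig g (r + d.1, c + d.2) = true := by
      intro hdig
      apply h1
      have hm := pvRect_mem.mp (pvDig_mem hdig)
      exact ⟨⟨hm.1, hm.2.1⟩, hm.2.2.1, hm.2.2.2⟩
    simp [hd]

lemma pvBEdge_cell (g : List (List Char)) (r c t : Int) :
    (match pvDigitValue g r c with
     | none => t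
     | some v =>
       pvDirs4.foldl (fun t d =>
         if (0 ≤ r + d.1 ∧ r + d.1 < (g.length : Int)) ∧ (0 ≤ c + d.2 ∧ c + d.2 < ((g.headD []).length : Int)) then
           match pvDigitValue g (r + d.1) (c + d.2) with
           | some w => t + (v + w)
           | none => t
         else t) t)
      = t + (if pvIsDigit (pvCharAt g r c) = true then
              (pvDirs4.map (fun d => if pvDig g (r + d.1, c + d.2) = true then pvV g (r, c) + pvV g (r + d.1, c + d.2) else 0)).sum
            else 0) := by
  by_cases h : pvIsDigit (pvCharAt g r c) = true
  · have hsome : pvDigitValue g r c = some (pvIntOf (pvCharAt g r c)) := by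
      simp [pvDigitValue, h]
    simp only [hsome]
    simp only [pvBEdge_dir]
    rw [PySem.List.foldl_add]
    simp [pvV, h]
  · simp [pvDigitValue, h]

-- port B as rectangle sums
lemma pvB_eq (s : List String) :
    sum_of_adjacent_numbers_alt s
      = (∑ p ∈ pvRectOf (s.map String.toList), if pvDig (s.map String.toList) p = true then pvV (s.map String.toList) p else 0)
        + (pvDirs4.map (fun d => pvU (s.map String.toList) d + pvT (s.map String.toList) d)).sum := by
  set g := s.map String.toList with hg
  show ((PySem.List.pyRange 0 (g.length : Int) 1).foldl (fun t r =>
      (PySem.List.pyRange 0 ((g.headD []).length : Int) 1).foldl (fun t c =>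
        match pvDigitValue g r c with
        | some v => t + v
        | none => t) t) 0)
    + ((PySem.List.pyRange 0 (g.length : Int) 1).foldl (fun t r =>
      (PySem.List.pyRange 0 ((g.headD []).length : Int) 1).foldl (fun t c =>
        match pvDigitValue g r c with
        | none => t
        | some v =>
          pvDirs4.foldl (fun t d =>
            if (0 ≤ r + d.1 ∧ r + d.1 < (g.length : Int)) ∧ (0 ≤ c + d.2 ∧ c + d.2 < ((g.headD []).length : Int)) then
              match pvDigitValue g (r + d.1) (c + d.2) with
              | some w => t + (v + w)
              | none => t
            else t) t) t) 0) = _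
  simp only [pvBBase_cell, pvBEdge_cell]
  rw [pvFold2 g.length (g.headD []).length
    (fun r c => if pvIsDigit (pvCharAt g r c) = true then pvV g (r, c) else 0)]
  rw [pvFold2 g.length (g.headD []).length
    (fun r c => if pvIsDigit (pvCharAt g r c) = true then
        (pvDirs4.map (fun d => if pvDig g (r + d.1, c + d.2) = true then pvV g (r, c) + pvV g (r + d.1, c + d.2) else 0)).sum
      else 0)]
  rw [show pvRect g.length (g.headD []).length = pvRectOf g from rfl]
  have hbase : ∀ p ∈ pvRectOf g,
      (if pvIsDigit (pvCharAt g p.1 p.2) = true then pvV g (p.1, p.2) else 0)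
        = (if pvDig g p = true then pvV g p else 0) := by
    intro p hp; rw [pvDig_of_mem hp]
  have hedge : ∀ p ∈ pvRectOf g,
      (if pvIsDigit (pvCharAt g p.1 p.2) = true then
          (pvDirs4.map (fun d => if pvDig g (p.1 + d.1, p.2 + d.2) = true then pvV g (p.1, p.2) + pvV g (p.1 + d.1, p.2 + d.2) else 0)).sum
        else 0)
        = (if pvDig g p = true then
            (pvDirs4.map (fun d => if pvDig g (p.1 + d.1, p.2 + d.2) = true then pvV g p + pvV g (p.1 + d.1, p.2 + d.2) else 0)).sum
          else 0) := by
    intro p hp; rw [pvDig_of_mem hp]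
  rw [Finset.sum_congr rfl hbase, Finset.sum_congr rfl hedge, pvSplitUT]

-- ===== VERDICT (by name: the statement is the Claim_ definition above) =====
theorem sum_of_adjacent_numbers_spec : Claim_equal_sum_of_adjacent_numbers := by
  intro s _ _
  show sum_of_adjacent_numbers s = sum_of_adjacent_numbers_alt s
  rw [pvA_eq, pvB_eq]
  congr 1
  have h1 := pvTU (s.map String.toList) 0 1
  have h2 := pvTU (s.map String.toList) 1 0
  have h3 := pvTU (s.map String.toList) 1 1
  have h4 := pvTU (s.map String.toList) 1 (-1)
  simp only [neg_zero, neg_neg] at h1 h2 h3 h4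
  simp only [pvDirs8, pvDirs4, List.map_cons, List.map_nil, List.sum_cons, List.sum_nil]
  rw [h1, h2, h3, h4]
  ring
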